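-- pv_equiv track=rewrite | github.com/chbauman/StoryTime | story_time/util.py | find_new_name
-- ===== SOURCE A (Python) =====
-- from typing import List, Callable, Sequence, Optional, Any
--
-- def find_new_name(
--     img_name: str, same_date_file_list: List[str], ext: str, max_n_imgs: int = 10000
-- ) -> str:
--     """Chooses a new filename that is not in the list and
--     contains the img_name in the beginning by appending an
--     int to the filename separated by an underscore.
--     """
--     for k in range(max_n_imgs):
--         new_name = img_name + "_" + str(k) + ext
--         try:
--             same_date_file_list.index(new_name)
--         except ValueError:
--             return img_name + "_" + str(k)
--
--     # If there are already more than `max_n_imgs` images, gives up.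
--     raise ValueError("ERROR: Way too many fucking images.")
-- ===== SOURCE B (Python) =====
-- def parse_index(mid):
--     """Value of mid if it is a canonical nonnegative decimal numeral
--     (nonempty, digits only, no leading zero), else None."""
--     if not mid or (mid[0] == '0' and len(mid) > 1):
--         return None
--     v = 0
--     for ch in mid:
--         if not ('0' <= ch <= '9'):
--             return None
--         v = v * 10 + (ord(ch) - 48)
--     return v
--
--
-- def find_new_name(img_name, same_date_file_list, ext, max_n_imgs=10000):
--     """Chooses a new filename that is not in the list and
--     contains the img_name in the beginning by appending an
--     int to the filename separated by an underscore.
--     """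
--     prefix = img_name + "_"
--     # one pass: collect the integer indices already used by names prefix+<k>+ext
--     used = set()
--     for name in same_date_file_list:
--         if name.startswith(prefix) and name.endswith(ext):
--             v = parse_index(name[len(prefix):len(name) - len(ext)])
--             if v is not None:
--                 used.add(v)
--     # smallest free index = first gap of the sorted used indices
--     k = 0
--     for i in sorted(used):
--         if i == k:
--             k += 1
--         elif i > k:
--             break
--     if k < max_n_imgs:
--         return prefix + str(k)
--     raise ValueError("ERROR: Way too many fucking images.")
-- ===== Notes on version B (the rewrite author's own statement) =====
-- stated objective: alternative
-- what changed: A probes candidate k = 0,1,2,... and scans the whole list for each candidate; B never probes candidates: it makes one pass over the list parsing each name of shape prefix+<canonical int>+ext into its integer index, then finds the smallest free index as the first gap of the sorted index set.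
import Mathlib
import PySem

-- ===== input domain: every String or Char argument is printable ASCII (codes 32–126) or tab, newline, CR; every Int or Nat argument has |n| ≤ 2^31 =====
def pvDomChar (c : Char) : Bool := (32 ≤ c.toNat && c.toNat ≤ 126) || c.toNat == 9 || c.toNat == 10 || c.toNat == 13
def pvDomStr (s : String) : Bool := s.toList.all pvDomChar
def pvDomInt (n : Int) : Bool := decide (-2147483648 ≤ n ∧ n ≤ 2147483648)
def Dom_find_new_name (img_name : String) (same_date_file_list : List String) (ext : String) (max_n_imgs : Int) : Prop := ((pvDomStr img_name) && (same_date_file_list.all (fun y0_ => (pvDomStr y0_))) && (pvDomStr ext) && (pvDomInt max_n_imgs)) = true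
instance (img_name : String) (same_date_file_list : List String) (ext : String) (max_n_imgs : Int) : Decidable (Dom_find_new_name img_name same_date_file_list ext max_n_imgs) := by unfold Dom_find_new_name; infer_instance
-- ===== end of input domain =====

-- B replaces A's candidate-probing loop (for k = 0,1,2,… scan the list with list.index) by a
-- different algorithm: one pass parsing each name shaped prefix+<canonical int>+ext into its
-- integer index, then the smallest free index found as the first gap of the sorted index set;
-- objective: alternative.


-- ===== PORT A =====
-- the `for k in range(max_n_imgs)` loop; `""` is the unreachable raise path (excluded by Pre_)
def findA_loop (img_name : String) (same_date_file_list : List String) (ext : String) (k : Int) : Nat → String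
  | 0 => ""
  | fuel + 1 =>
      let new_name := img_name ++ "_" ++ PySem.Int.toStr k ++ ext
      match PySem.List.index? same_date_file_list new_name with
      | some _ => findA_loop img_name same_date_file_list ext (k + 1) fuel
      | none => img_name ++ "_" ++ PySem.Int.toStr k

def find_new_name (img_name : String) (same_date_file_list : List String) (ext : String) (max_n_imgs : Int) : String :=
  findA_loop img_name same_date_file_list ext 0 max_n_imgs.toNat

-- ===== PORT B =====
-- parse_index's digit loop: v = v*10 + (ord(ch)-48), None on a non-digit
def parseDigits : List Char → Int → Option Int
  | [], v => some v
  | c :: cs, v => if '0' ≤ c ∧ c ≤ '9' then parseDigits cs (v * 10 + ((c.toNat : Int) - 48)) else none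

-- parse_index(mid): value of mid if canonical nonnegative decimal numeral, else None
def parseIndex? (mid : List Char) : Option Int :=
  match mid with
  | [] => none
  | c :: cs => if c = '0' ∧ cs ≠ [] then none else parseDigits (c :: cs) 0

-- the one pass over the list: used = { parse_index(name[lp : len(name)-le]) ≠ None }
def findB_used (pfx ext : String) (same_date_file_list : List String) : PySem.Set Int :=
  same_date_file_list.foldl
    (fun used name =>
      if PySem.Str.startswith name pfx && PySem.Str.endswith name ext then
        match parseIndex? (PySem.Str.slice name (some (PySem.Str.len pfx)) (some (PySem.Str.len name - PySem.Str.len ext))).toList with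
        | some v => PySem.Set.add used v
        | none => used
      else used)
    PySem.Set.empty

-- the gap loop: `for i in sorted(used): if i == k: k += 1 elif i > k: break`
def gapScan : Int → List Int → Int
  | k, [] => k
  | k, i :: rest => if i = k then gapScan (k + 1) rest else if k < i then k else gapScan k rest

def find_new_name_alt (img_name : String) (same_date_file_list : List String) (ext : String) (max_n_imgs : Int) : String :=
  let pfx := img_name ++ "_"
  let k := gapScan 0 (PySem.List.sorted (findB_used pfx ext same_date_file_list) (fun x => x) false)
  if k < max_n_imgs then pfx ++ PySem.Int.toStr k else ""

-- ===== PRECONDITION & SPEC =====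
-- Pre_ excludes exactly the inputs on which Python A raises ValueError (and B raises the same):
-- some k in range(max_n_imgs) must yield a candidate name absent from the list.  The range of k
-- is capped at len(list)+1, which loses nothing: the len(list)+1 distinct candidates cannot all
-- occur in a list of len(list) entries, so beyond the cap the existential is automatically true.
def Pre_find_new_name (img_name : String) (same_date_file_list : List String) (ext : String) (max_n_imgs : Int) : Prop :=
  ∃ k ∈ PySem.List.pyRange 0 (min max_n_imgs (PySem.List.len same_date_file_list + 1)) 1,
    (img_name ++ "_" ++ PySem.Int.toStr k ++ ext) ∉ same_date_file_list
instance (img_name : String) (same_date_file_list : List String) (ext : String) (max_n_imgs : Int) : Decidable (Pre_find_new_name img_name same_date_file_list ext max_n_imgs) := by unfold Pre_find_new_name; infer_instance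

def pvWitness_find_new_name : String × List String × String × Int := ("img", ["img_0.jpg"], ".jpg", 3)

def Spec_find_new_name (img_name : String) (same_date_file_list : List String) (ext : String) (max_n_imgs : Int) (out : String) : Prop := out = find_new_name_alt img_name same_date_file_list ext max_n_imgs
instance (img_name : String) (same_date_file_list : List String) (ext : String) (max_n_imgs : Int) (out : String) : Decidable (Spec_find_new_name img_name same_date_file_list ext max_n_imgs out) := by unfold Spec_find_new_name; infer_instance

-- ===== CLAIM (what is proved, stated in full; the proofs are below) =====
def Claim_equal_find_new_name : Prop := ∀ (img_name : String) (same_date_file_list : List String) (ext : String) (max_n_imgs : Int), Dom_find_new_name img_name same_date_file_list ext max_n_imgs → Pre_find_new_name img_name same_date_file_list ext max_n_imgs → Spec_find_new_name img_name same_date_file_list ext max_n_imgs (find_new_name img_name same_date_file_list ext max_n_imgs)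

-- ===== LEMMAS AND PROOFS =====

-- ---- decimal rendering: Nat.toDigits 10 characterised by a clean recursion ----

def digitsRep (n : Nat) : List Char :=
  if n < 10 then [Nat.digitChar n]
  else digitsRep (n / 10) ++ [Nat.digitChar (n % 10)]
termination_by n
decreasing_by exact Nat.div_lt_self (by omega) (by omega)

lemma toDigitsCore_append (fuel : Nat) : ∀ (n : Nat) (acc : List Char),
    Nat.toDigitsCore 10 fuel n acc = Nat.toDigitsCore 10 fuel n [] ++ acc := by
  induction fuel with
  | zero => intro n acc; simp [Nat.toDigitsCore]
  | succ fuel ih =>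
      intro n acc
      simp only [Nat.toDigitsCore]
      split
      · simp
      · rw [ih (n / 10) (Nat.digitChar (n % 10) :: acc), ih (n / 10) [Nat.digitChar (n % 10)]]
        simp

lemma toDigitsCore_eq_digitsRep (fuel : Nat) : ∀ (n : Nat), n < fuel →
    Nat.toDigitsCore 10 fuel n [] = digitsRep n := by
  induction fuel with
  | zero => intro n h; omega
  | succ fuel ih =>
      intro n h
      rw [digitsRep]
      simp only [Nat.toDigitsCore]
      by_cases h10 : n < 10
      · have h0 : n / 10 = 0 := Nat.div_eq_of_lt h10
        rw [if_pos h0, if_pos h10, Nat.mod_eq_of_lt h10]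
      · have h0 : ¬ n / 10 = 0 := by omega
        have hlt : n / 10 < fuel := by omega
        rw [if_neg h0, if_neg h10, toDigitsCore_append, ih (n / 10) hlt]

lemma toChars_nonneg (k : Int) (hk : 0 ≤ k) : PySem.Int.toChars k = digitsRep k.toNat := by
  unfold PySem.Int.toChars
  rw [if_neg (by omega), Nat.toDigits]
  exact toDigitsCore_eq_digitsRep _ _ (Nat.lt_succ_self _)

lemma digitsRep_ne_nil (n : Nat) : digitsRep n ≠ [] := by
  rw [digitsRep]
  split <;> simp

-- facts about digit characters
lemma digitChar_facts (d : Nat) (hd : d < 10) :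
    ('0' ≤ Nat.digitChar d ∧ Nat.digitChar d ≤ '9') ∧ (Nat.digitChar d).toNat = 48 + d := by
  interval_cases d <;> exact ⟨by decide, by decide⟩

lemma digitChar_eq_zero_iff (d : Nat) (hd : d < 10) : Nat.digitChar d = '0' ↔ d = 0 := by
  interval_cases d <;> decide

lemma digitChar_of_digit (c : Char) (h0 : '0' ≤ c) (h9 : c ≤ '9') :
    Nat.digitChar (c.toNat - 48) = c := by
  have h48 : 48 ≤ c.toNat := h0
  have h57 : c.toNat ≤ 57 := h9
  have hv : c = Char.ofNat c.toNat := (Char.ofNat_toNat c).symm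
  rw [hv]
  interval_cases h : c.toNat <;> decide

lemma toNat_ne_48_of_ne_zero (c : Char) (hne : c ≠ '0') : c.toNat ≠ 48 := by
  intro h48
  apply hne
  rw [← Char.ofNat_toNat c, h48]

-- ---- the parser round-trips with the renderer ----

lemma parseDigits_append (xs ys : List Char) (v : Int) :
    parseDigits (xs ++ ys) v = (parseDigits xs v).bind (fun w => parseDigits ys w) := by
  induction xs generalizing v with
  | nil => simp [parseDigits]
  | cons c cs ih =>
      simp only [List.cons_append, parseDigits]
      split
      · exact ih _
      · simp

lemma parseDigits_digitsRep (n : Nat) : ∀ (v : Int),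
    parseDigits (digitsRep n) v = some (v * 10 ^ (digitsRep n).length + n) := by
  induction n using Nat.strong_induction_on with
  | _ n ih =>
    intro v
    rw [digitsRep]
    by_cases h10 : n < 10
    · rw [if_pos h10]
      obtain ⟨⟨hd0, hd9⟩, htn⟩ := digitChar_facts n h10
      simp only [parseDigits, if_pos (And.intro hd0 hd9), htn, List.length_cons,
        List.length_nil]
      congr 1
      push_cast
      ring
    · rw [if_neg h10]
      rw [parseDigits_append, ih (n / 10) (Nat.div_lt_self (by omega) (by omega))]
      obtain ⟨⟨hd0, hd9⟩, htn⟩ := digitChar_facts (n % 10) (Nat.mod_lt _ (by omega))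
      simp only [Option.bind_some, parseDigits, if_pos (And.intro hd0 hd9), htn,
        List.length_append, List.length_cons, List.length_nil]
      congr 1
      have hn : ((n : Int)) = 10 * ((n / 10 : Nat) : Int) + ((n % 10 : Nat) : Int) := by
        exact_mod_cast (Nat.div_add_mod n 10).symm
      rw [pow_succ, hn]
      push_cast
      ring

lemma parseDigits_lower (cs : List Char) : ∀ (v w : Int), 0 ≤ v →
    parseDigits cs v = some w → v ≤ w ∧ 0 ≤ w := by
  induction cs with
  | nil => intro v w hv h; simp [parseDigits] at h; omega
  | cons c cs ih =>
      intro v w hv h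
      simp only [parseDigits] at h
      split at h
      · rename_i hc
        have h48 : (48 : Int) ≤ (c.toNat : Int) := by exact_mod_cast (show 48 ≤ c.toNat from hc.1)
        have := ih (v * 10 + ((c.toNat : Int) - 48)) w (by nlinarith) h
        constructor
        · nlinarith [this.1]
        · exact this.2
      · exact absurd h (by simp)

lemma digitsRep_head_ne_zero (n : Nat) : ∀ (_ : n ≠ 0) (c : Char) (cs : List Char),
    digitsRep n = c :: cs → c ≠ '0' := by
  induction n using Nat.strong_induction_on with
  | _ n ih =>
    intro hn c cs h
    rw [digitsRep] at h
    by_cases h10 : n < 10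
    · rw [if_pos h10] at h
      obtain ⟨hc, -⟩ := List.cons.inj h
      intro h0
      exact hn ((digitChar_eq_zero_iff n h10).mp (hc.trans h0))
    · rw [if_neg h10] at h
      obtain ⟨c', cs', hrep⟩ : ∃ c' cs', digitsRep (n / 10) = c' :: cs' := by
        cases hx : digitsRep (n / 10) with
        | nil => exact absurd hx (digitsRep_ne_nil _)
        | cons a b => exact ⟨a, b, rfl⟩
      rw [hrep] at h
      have hc : c = c' := (List.cons.inj h).1.symm
      rw [hc]
      exact ih (n / 10) (Nat.div_lt_self (by omega) (by omega)) (by omega) c' cs' hrep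

lemma parseIndex?_digitsRep (n : Nat) : parseIndex? (digitsRep n) = some (n : Int) := by
  obtain ⟨c, cs, h⟩ : ∃ c cs, digitsRep n = c :: cs := by
    cases hx : digitsRep n with
    | nil => exact absurd hx (digitsRep_ne_nil _)
    | cons a b => exact ⟨a, b, rfl⟩
  have hval : parseDigits (c :: cs) 0 = some (n : Int) := by
    rw [← h, parseDigits_digitsRep]
    norm_num
  by_cases hn : n = 0
  · subst hn
    have h0 : digitsRep 0 = ['0'] := by rw [digitsRep]; norm_num; rfl
    rw [h0]
    simp [parseIndex?, parseDigits]
  · have hc0 : c ≠ '0' := digitsRep_head_ne_zero n hn c cs h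
    rw [h]
    simp only [parseIndex?]
    rw [if_neg (by intro hx; exact hc0 hx.1)]
    exact hval

lemma parseDigits_canon (cs : List Char) : ∀ (c : Char) (v : Int),
    (c ≠ '0' ∨ cs = []) → parseDigits (c :: cs) 0 = some v → c :: cs = digitsRep v.toNat := by
  induction cs using List.reverseRecOn with
  | nil =>
      intro c v _ h
      simp only [parseDigits] at h
      by_cases hc : '0' ≤ c ∧ c ≤ '9'
      · rw [if_pos hc] at h
        simp only [parseDigits, Option.some.injEq] at h
        have h48 : 48 ≤ c.toNat := hc.1
        have h57 : c.toNat ≤ 57 := hc.2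
        have hvt : v.toNat = c.toNat - 48 := by omega
        rw [digitsRep, if_pos (by omega), hvt, digitChar_of_digit c hc.1 hc.2]
      · rw [if_neg hc] at h
        exact absurd h (by simp)
  | append_singleton ds d ihds =>
      intro c v hc h
      rw [show c :: (ds ++ [d]) = (c :: ds) ++ [d] from rfl, parseDigits_append] at h
      cases hw : parseDigits (c :: ds) 0 with
      | none => rw [hw] at h; exact absurd h (by simp)
      | some w =>
          rw [hw] at h
          simp only [Option.bind_some, parseDigits] at h
          by_cases hd : '0' ≤ d ∧ d ≤ '9'
          · rw [if_pos hd] at h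
            simp only [parseDigits, Option.some.injEq] at h
            have hcz : c ≠ '0' := hc.resolve_right (by simp)
            have hds : c :: ds = digitsRep w.toNat := ihds c w (Or.inl hcz) hw
            -- w ≥ 1: the leading digit of c :: ds is nonzero
            have hw1 : 1 ≤ w := by
              simp only [parseDigits] at hw
              by_cases hcd : '0' ≤ c ∧ c ≤ '9'
              · rw [if_pos hcd] at hw
                have h48 : 48 ≤ c.toNat := hcd.1
                have hne48 : c.toNat ≠ 48 := toNat_ne_48_of_ne_zero c hcz
                have := parseDigits_lower ds (0 * 10 + ((c.toNat : Int) - 48)) w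
                  (by push_cast; omega) hw
                have h1 := this.1
                push_cast at h1
                omega
              · rw [if_neg hcd] at hw; exact absurd hw (by simp)
            have hd48 : 48 ≤ d.toNat := hd.1
            have hd57 : d.toNat ≤ 57 := hd.2
            have hv10 : 10 ≤ v := by omega
            rw [digitsRep, if_neg (by omega)]
            have hq : v.toNat / 10 = w.toNat := by omega
            have hr : v.toNat % 10 = d.toNat - 48 := by omega
            rw [hq, hr, ← hds, digitChar_of_digit d hd.1 hd.2, List.cons_append]
          · rw [if_neg hd] at h
            exact absurd h (by simp)

lemma parseIndex?_eq_some (mid : List Char) (v : Int) (h : parseIndex? mid = some v) :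
    0 ≤ v ∧ mid = digitsRep v.toNat := by
  cases mid with
  | nil => exact absurd h (by simp [parseIndex?])
  | cons c cs =>
      simp only [parseIndex?] at h
      by_cases hcond : c = '0' ∧ cs ≠ []
      · rw [if_pos hcond] at h; exact absurd h (by simp)
      · rw [if_neg hcond] at h
        refine ⟨(parseDigits_lower (c :: cs) 0 v (by norm_num) h).1, ?_⟩
        exact parseDigits_canon cs c v (by tauto) h

-- ---- str(k) is never the empty string ----
lemma toChars_ne_nil (k : Int) : PySem.Int.toChars k ≠ [] := by
  unfold PySem.Int.toChars
  split
  · simp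
  · rw [Nat.toDigits, toDigitsCore_eq_digitsRep _ _ (Nat.lt_succ_self _)]
    exact digitsRep_ne_nil _

-- ---- the parse: n = p ++ m ++ e (m nonempty) iff startswith/endswith and the middle slice is m ----
lemma parse_iff (n p e m : List Char) (hm : m ≠ []) :
    n = p ++ m ++ e ↔
      (p <+: n ∧ e <:+ n ∧
        List.take (n.length - e.length - p.length) (List.drop p.length n) = m) := by
  constructor
  · rintro rfl
    refine ⟨⟨m ++ e, by simp⟩, List.suffix_append _ _, ?_⟩
    have h1 : List.drop p.length (p ++ m ++ e) = m ++ e := by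
      simp
    rw [h1]
    have h2 : (p ++ m ++ e).length - e.length - p.length = m.length := by
      simp [List.length_append]; omega
    rw [h2]
    exact List.take_left
  · rintro ⟨hp, he, hs⟩
    have hple : p.length ≤ n.length := hp.length_le
    have hele : e.length ≤ n.length := he.length_le
    have htp : n.take p.length = p := (List.prefix_iff_eq_take.mp hp).symm
    have hde : n.drop (n.length - e.length) = e := (List.suffix_iff_eq_drop.mp he).symm
    have hlen : p.length + e.length < n.length := by
      by_contra hle
      have h0 : n.length - e.length - p.length = 0 := by omega
      rw [h0] at hs
      simp at hs
      exact hm hs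
    have h3 : List.drop (n.length - e.length) n
        = List.drop (n.length - e.length - p.length) (List.drop p.length n) := by
      rw [List.drop_drop]; congr 1; omega
    have key : List.drop p.length n = m ++ e := by
      conv_lhs => rw [← List.take_append_drop (n.length - e.length - p.length) (List.drop p.length n)]
      rw [hs, ← h3, hde]
    calc n = List.take p.length n ++ List.drop p.length n := (List.take_append_drop _ _).symm
      _ = p ++ (m ++ e) := by rw [htp, key]
      _ = p ++ m ++ e := by simp

-- ---- membership in the index set B builds ----
lemma mem_foldl_used (pfx ext : String) (lst : List String) (acc : PySem.Set Int) (x : Int) :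
    (x ∈ lst.foldl
      (fun used name =>
        if PySem.Str.startswith name pfx && PySem.Str.endswith name ext then
          match parseIndex? (PySem.Str.slice name (some (PySem.Str.len pfx)) (some (PySem.Str.len name - PySem.Str.len ext))).toList with
          | some v => PySem.Set.add used v
          | none => used
        else used) acc) ↔
    (x ∈ acc ∨ ∃ name ∈ lst,
      (PySem.Str.startswith name pfx && PySem.Str.endswith name ext) = true ∧
      parseIndex? (PySem.Str.slice name (some (PySem.Str.len pfx)) (some (PySem.Str.len name - PySem.Str.len ext))).toList = some x) := by
  induction lst generalizing acc with
  | nil => simp [List.foldl]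
  | cons hd tl ih =>
      simp only [List.foldl_cons]
      by_cases hcond : (PySem.Str.startswith hd pfx && PySem.Str.endswith hd ext) = true
      · rw [if_pos hcond]
        cases hp : parseIndex? (PySem.Str.slice hd (some (PySem.Str.len pfx)) (some (PySem.Str.len hd - PySem.Str.len ext))).toList with
        | some v =>
            simp only [hp]
            rw [ih]
            simp only [PySem.Set.mem_add, List.mem_cons]
            constructor
            · rintro ((h | rfl) | ⟨nm, hnm, hc, hsl⟩)
              · exact Or.inl h
              · exact Or.inr ⟨hd, Or.inl rfl, hcond, hp⟩
              · exact Or.inr ⟨nm, Or.inr hnm, hc, hsl⟩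
            · rintro (h | ⟨nm, hnm, hc, hsl⟩)
              · exact Or.inl (Or.inl h)
              · rcases hnm with rfl | hnm'
                · rw [hp] at hsl
                  exact Or.inl (Or.inr (Option.some.inj hsl).symm)
                · exact Or.inr ⟨nm, hnm', hc, hsl⟩
        | none =>
            simp only [hp]
            rw [ih]
            apply or_congr_right
            constructor
            · rintro ⟨nm, hnm, hc, hsl⟩
              exact ⟨nm, List.mem_cons_of_mem _ hnm, hc, hsl⟩
            · rintro ⟨nm, hnm, hc, hsl⟩
              rcases List.mem_cons.mp hnm with rfl | hnm'
              · rw [hp] at hsl; exact absurd hsl (by simp)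
              · exact ⟨nm, hnm', hc, hsl⟩
      · rw [if_neg hcond]
        rw [ih]
        apply or_congr_right
        constructor
        · rintro ⟨nm, hnm, hc, hsl⟩
          exact ⟨nm, List.mem_cons_of_mem _ hnm, hc, hsl⟩
        · rintro ⟨nm, hnm, hc, hsl⟩
          rcases List.mem_cons.mp hnm with rfl | hnm'
          · exact absurd hc hcond
          · exact ⟨nm, hnm', hc, hsl⟩

-- v is in B's set iff v ≥ 0 and the full candidate name is in the list
lemma mem_used_iff (pfx ext : String) (lst : List String) (v : Int) :
    v ∈ findB_used pfx ext lst ↔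
      (0 ≤ v ∧ (pfx ++ PySem.Int.toStr v ++ ext) ∈ lst) := by
  rw [findB_used, mem_foldl_used]
  simp only [PySem.Set.empty, List.not_mem_nil, false_or]
  constructor
  · rintro ⟨nm, hnm, hc, hsl⟩
    have hsw := (PySem.Chars.startswith_iff nm.toList pfx.toList).mp (by
      have := (Bool.and_eq_true _ _).mp hc |>.1
      rwa [PySem.Str.startswith_eq] at this)
    have hew := (PySem.Chars.endswith_iff nm.toList ext.toList).mp (by
      have := (Bool.and_eq_true _ _).mp hc |>.2
      rwa [PySem.Str.endswith_eq] at this)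
    obtain ⟨hv0, hmid⟩ := parseIndex?_eq_some _ _ hsl
    have hsl' : List.take (nm.toList.length - ext.toList.length - pfx.toList.length)
        (List.drop pfx.toList.length nm.toList) = (PySem.Int.toStr v).toList := by
      have h1 : (PySem.Str.slice nm (some (PySem.Str.len pfx)) (some (PySem.Str.len nm - PySem.Str.len ext))).toList = digitsRep v.toNat := hmid
      rw [PySem.Str.toList_slice] at h1
      rw [PySem.Chars.slice_eq_listSlice] at h1
      rw [PySem.Str.len_eq, PySem.Str.len_eq, PySem.Str.len_eq] at h1
      have hb : (0:Int) ≤ (nm.toList.length:Int) - (ext.toList.length:Int) := by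
        have := hew.length_le; omega
      rw [PySem.List.slice_toNat nm.toList (Int.natCast_nonneg _) hb] at h1
      rw [PySem.Int.toList_toStr, toChars_nonneg v hv0]
      simpa [Int.toNat_sub] using h1
    have h2 : nm.toList = pfx.toList ++ (PySem.Int.toStr v).toList ++ ext.toList :=
      (parse_iff _ _ _ _ (by rw [PySem.Int.toList_toStr]; exact toChars_ne_nil v)).mpr ⟨hsw, hew, hsl'⟩
    have h3 : nm = pfx ++ PySem.Int.toStr v ++ ext := by
      rw [String.ext_iff]
      simpa [String.toList_append] using h2
    exact ⟨hv0, h3 ▸ hnm⟩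
  · rintro ⟨hv0, hmem⟩
    have hparse := (parse_iff (pfx ++ PySem.Int.toStr v ++ ext).toList pfx.toList
        ext.toList (PySem.Int.toStr v).toList
        (by rw [PySem.Int.toList_toStr]; exact toChars_ne_nil v)).mp
        (by simp [String.toList_append])
    obtain ⟨hsw, hew, hsl⟩ := hparse
    set nm := pfx ++ PySem.Int.toStr v ++ ext with hnm
    have hc : (PySem.Str.startswith nm pfx && PySem.Str.endswith nm ext) = true := by
      rw [Bool.and_eq_true, PySem.Str.startswith_eq, PySem.Str.endswith_eq,
        PySem.Chars.startswith_iff, PySem.Chars.endswith_iff]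
      exact ⟨hsw, hew⟩
    refine ⟨nm, hmem, hc, ?_⟩
    have hlist : (PySem.Str.slice nm (some (PySem.Str.len pfx)) (some (PySem.Str.len nm - PySem.Str.len ext))).toList = (PySem.Int.toStr v).toList := by
      rw [PySem.Str.toList_slice, PySem.Chars.slice_eq_listSlice,
        PySem.Str.len_eq, PySem.Str.len_eq, PySem.Str.len_eq,
        PySem.List.slice_toNat nm.toList (Int.natCast_nonneg _) (by have := hew.length_le; omega)]
      simpa [Int.toNat_sub] using hsl
    rw [hlist, PySem.Int.toList_toStr, toChars_nonneg v hv0, parseIndex?_digitsRep,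
      Int.toNat_of_nonneg hv0]

lemma nodup_foldl_used (pfx ext : String) (lst : List String) : ∀ (acc : PySem.Set Int),
    acc.Nodup →
    (lst.foldl
      (fun used name =>
        if PySem.Str.startswith name pfx && PySem.Str.endswith name ext then
          match parseIndex? (PySem.Str.slice name (some (PySem.Str.len pfx)) (some (PySem.Str.len name - PySem.Str.len ext))).toList with
          | some v => PySem.Set.add used v
          | none => used
        else used) acc).Nodup := by
  induction lst with
  | nil => intro acc h; exact h
  | cons hd tl ih =>
      intro acc h
      rw [List.foldl_cons]
      apply ih
      by_cases hcond : (PySem.Str.startswith hd pfx && PySem.Str.endswith hd ext) = true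
      · rw [if_pos hcond]
        cases hp : parseIndex? (PySem.Str.slice hd (some (PySem.Str.len pfx)) (some (PySem.Str.len hd - PySem.Str.len ext))).toList with
        | some v =>
            simp only [hp]
            apply PySem.Set.nodup_add
            exact h
        | none => simp only [hp]; exact h
      · rw [if_neg hcond]; exact h

lemma nodup_used (pfx ext : String) (lst : List String) : (findB_used pfx ext lst).Nodup := by
  rw [findB_used]
  exact nodup_foldl_used pfx ext lst PySem.Set.empty (by simp [PySem.Set.empty])

-- ---- the gap scan computes the least free index ----
lemma gapScan_spec (L : List Int) : ∀ (k : Int), L.Pairwise (· < ·) →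
    k ≤ gapScan k L ∧ gapScan k L ∉ L ∧ ∀ m, k ≤ m → m < gapScan k L → m ∈ L := by
  induction L with
  | nil =>
      intro k _
      refine ⟨le_refl _, by simp [gapScan], fun m h1 h2 => ?_⟩
      simp only [gapScan] at h2
      omega
  | cons i rest ih =>
      intro k hp
      have hpr : rest.Pairwise (· < ·) := (List.pairwise_cons.mp hp).2
      have hi : ∀ x ∈ rest, i < x := (List.pairwise_cons.mp hp).1
      simp only [gapScan]
      by_cases h1 : i = k
      · subst h1
        rw [if_pos rfl]
        obtain ⟨ha, hb, hc⟩ := ih (i + 1) hpr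
        refine ⟨by omega, ?_, ?_⟩
        · intro hmem
          rcases List.mem_cons.mp hmem with heq | hmem'
          · omega
          · exact hb hmem'
        · intro m hm1 hm2
          rcases eq_or_lt_of_le hm1 with rfl | hlt
          · exact List.mem_cons_self ..
          · exact List.mem_cons_of_mem _ (hc m (by omega) hm2)
      · rw [if_neg h1]
        by_cases h2 : k < i
        · rw [if_pos h2]
          refine ⟨le_refl _, ?_, fun m hm1 hm2 => by omega⟩
          intro hmem
          rcases List.mem_cons.mp hmem with heq | hmem'
          · omega
          · exact absurd (hi _ hmem') (by omega)
        · rw [if_neg h2]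
          have hik : i < k := by omega
          obtain ⟨ha, hb, hc⟩ := ih k hpr
          refine ⟨ha, ?_, ?_⟩
          · intro hmem
            rcases List.mem_cons.mp hmem with heq | hmem'
            · omega
            · exact hb hmem'
          · intro m hm1 hm2
            exact List.mem_cons_of_mem _ (hc m hm1 hm2)

-- ---- A's loop returns the least free index when it is in range ----
lemma findA_loop_eq (img ext : String) (lst : List String) (r : Int)
    (hfree : (img ++ "_" ++ PySem.Int.toStr r ++ ext) ∉ lst) :
    ∀ (fuel : Nat) (k : Int), k ≤ r →
      (∀ m, k ≤ m → m < r → (img ++ "_" ++ PySem.Int.toStr m ++ ext) ∈ lst) →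
      findA_loop img lst ext k fuel =
        if r < k + (fuel : Int) then img ++ "_" ++ PySem.Int.toStr r else "" := by
  intro fuel
  induction fuel with
  | zero =>
      intro k hk _
      rw [if_neg (by push_cast; omega)]
      rfl
  | succ fuel ih =>
      intro k hk hall
      simp only [findA_loop]
      by_cases hkr : k = r
      · subst hkr
        have hidx : PySem.List.index? lst (img ++ "_" ++ PySem.Int.toStr k ++ ext) = none :=
          (PySem.List.index?_eq_none_iff _ _).mpr hfree
        simp only [hidx]
        rw [if_pos (by push_cast; omega)]
      · have hklt : k < r := by omega
        have hmem : (img ++ "_" ++ PySem.Int.toStr k ++ ext) ∈ lst :=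
          hall k (le_refl _) hklt
        cases hidx : PySem.List.index? lst (img ++ "_" ++ PySem.Int.toStr k ++ ext) with
        | none => exact absurd ((PySem.List.index?_eq_none_iff _ _).mp hidx) (by simpa using hmem)
        | some j =>
            simp only [hidx]
            rw [ih (k + 1) (by omega) (fun m hm1 hm2 => hall m (by omega) hm2)]
            by_cases hr2 : r < k + ((fuel + 1 : Nat) : Int)
            · rw [if_pos (by push_cast at hr2 ⊢; omega), if_pos hr2]
            · rw [if_neg (by push_cast at hr2 ⊢; omega), if_neg hr2]

-- ===== VERDICT (by name: the statement is the Claim_ definition above) =====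
theorem find_new_name_spec : Claim_equal_find_new_name := by
  intro img lst ext maxn _ _
  unfold Spec_find_new_name find_new_name
  simp only [find_new_name_alt]
  set used := findB_used (img ++ "_") ext lst with hused
  set L := PySem.List.sorted used (fun x => x) false with hL
  have hperm : L.Perm used := PySem.List.sorted_perm used (fun x => x) false
  have hnd : L.Nodup := hperm.nodup_iff.mpr (nodup_used _ _ _)
  have hple : L.Pairwise (· ≤ ·) := by
    have := PySem.List.sorted_pairwise used (fun x => x) (κ := Int)
    simpa [hL] using this
  have hplt : L.Pairwise (· < ·) := by
    refine (hple.and hnd).imp ?_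
    rintro a b ⟨hab, hne⟩
    exact lt_of_le_of_ne hab hne
  obtain ⟨hr0, hrnot, hrall⟩ := gapScan_spec L 0 hplt
  set r := gapScan 0 L with hr
  have hmemL : ∀ x : Int, x ∈ L ↔ x ∈ used := fun x => hperm.mem_iff
  have hfree : (img ++ "_" ++ PySem.Int.toStr r ++ ext) ∉ lst := by
    intro hmem
    exact hrnot ((hmemL r).mpr ((mem_used_iff _ _ _ r).mpr ⟨hr0, hmem⟩))
  have hall : ∀ m : Int, 0 ≤ m → m < r → (img ++ "_" ++ PySem.Int.toStr m ++ ext) ∈ lst :=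
    fun m h1 h2 => ((mem_used_iff _ _ _ m).mp ((hmemL m).mp (hrall m h1 h2))).2
  rw [findA_loop_eq img ext lst r hfree maxn.toNat 0 hr0 hall]
  by_cases hlt : r < maxn
  · rw [if_pos (by omega), if_pos hlt]
  · rw [if_neg (by omega), if_neg hlt]
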